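-- pv_equiv track=rewrite | github.com/leo-editor/leo-editor | leo/external/pyzo/core/editorTabs.py | get_shortest_unique_filename
-- ===== SOURCE A (Python) =====
-- def get_shortest_unique_filename(filename, filenames):
--     """ Get a representation of filename in a way that makes it look
--     unique compared to the other given filenames. The most unique part
--     of the path is used, and every directory in between that part and the
--     actual filename is represented with a slash.
--     """
--
--     # Normalize and avoid having filename itself in filenames
--     filename1 = filename.replace('\\', '/')
--     filenames = [fn.replace('\\', '/') for fn in filenames]
--     filenames = [fn for fn in filenames if fn != filename1]
--
--     # Prepare for finding uniqueness
--     nameparts1 = filename1.split('/')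
--     uniqueness = [len(filenames) for i in nameparts1]
--
--     # Establish what parts of the filename are not unique when compared to
--     # each entry in filenames.
--     for filename2 in filenames:
--         nameparts2 = filename2.split('/')
--         nonunique_for_this_filename = set()
--         for i in range(len(nameparts1)):
--             if i < len(nameparts2):
--                 if nameparts2[i] == nameparts1[i]:
--                     nonunique_for_this_filename.add(i)
--                 if nameparts2[-1-i] == nameparts1[-1-i]:
--                     nonunique_for_this_filename.add(-i-1)
--         for i in nonunique_for_this_filename:
--             uniqueness[i] -= 1
--
--     # How unique is the filename? If its not unique at all, use only base name
--     max_uniqueness = max(uniqueness[:-1])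
--     if max_uniqueness == 0:
--         return nameparts1[-1]
--
--     # Produce display name based on base name and last most-unique part
--     displayname = nameparts1[-1]
--     for i in reversed(range(len(uniqueness)-1)):
--         displayname = '/' + displayname
--         if uniqueness[i] == max_uniqueness:
--             displayname = nameparts1[i] + displayname
--             break
--     return displayname
-- ===== SOURCE B (Python) =====
-- def get_shortest_unique_filename(filename, filenames):
--     """Inverted-index implementation: instead of comparing the candidate's
--     parts against every other filename, build two hash counters over the
--     other filenames' own parts -- keyed by (front position, part) and by
--     (distance from end, part) -- then read each slot's match count off the
--     tables by two dictionary lookups."""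
--     fn1 = filename.replace('\\', '/')
--     parts1 = fn1.split('/')
--     L = len(parts1)
--     others = [fn.replace('\\', '/').split('/')
--               for fn in filenames if fn.replace('\\', '/') != fn1]
--     n = len(others)
--
--     front = {}
--     back = {}
--     for p2 in others:
--         m = len(p2)
--         for j, part in enumerate(p2):
--             k = (j, part)
--             front[k] = front.get(k, 0) + 1
--             k = (m - 1 - j, part)
--             back[k] = back.get(k, 0) + 1
--
--     uniqueness = [n - front.get((j, parts1[j]), 0) - back.get((L - 1 - j, parts1[j]), 0)
--                   for j in range(L)]
--
--     m = max(uniqueness[:-1])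
--     if m == 0:
--         return parts1[-1]
--     i = max(j for j in range(L - 1) if uniqueness[j] == m)
--     return parts1[i] + '/' * (L - 1 - i) + parts1[-1]
-- ===== Notes on version B (the rewrite author's own statement) =====
-- stated objective: alternative
-- what changed: Replaces A's pairwise comparison loop (per other filename, a set of signed indices plus in-place decrements of a shared uniqueness list) by an inverted index: two hash counter tables keyed by (front position, part) and (distance-from-end, part) are built from the other filenames' own parts in one pass, and each slot's uniqueness is then read off by two dictionary lookups; the display name is assembled by a closed formula instead of A's reversed break-loop.
import Mathlib
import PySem

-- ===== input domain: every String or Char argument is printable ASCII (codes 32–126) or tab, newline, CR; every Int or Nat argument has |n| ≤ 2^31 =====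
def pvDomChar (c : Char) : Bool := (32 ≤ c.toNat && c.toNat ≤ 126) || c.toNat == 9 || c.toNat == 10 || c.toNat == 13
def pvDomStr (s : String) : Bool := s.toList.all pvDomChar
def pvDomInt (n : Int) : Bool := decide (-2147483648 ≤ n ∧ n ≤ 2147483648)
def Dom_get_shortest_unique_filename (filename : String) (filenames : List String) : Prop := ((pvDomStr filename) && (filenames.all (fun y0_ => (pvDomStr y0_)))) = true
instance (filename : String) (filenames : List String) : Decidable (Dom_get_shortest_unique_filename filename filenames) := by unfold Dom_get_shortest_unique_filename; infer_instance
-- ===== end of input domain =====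

-- B replaces A's pairwise part-comparison loop (with its per-file set of signed indices and
-- in-place decrements) by two hash counter tables built from the other filenames' own parts;
-- objective: alternative (same asymptotic cost, different data structure).


-- shared primitives for Python string operations (exact on our domain)
-- Python 'a + b' on strings
def scat (a b : String) : String := String.ofList (a.toList ++ b.toList)
-- Python 's.split(sep)' for sep ≠ "" (PySem.Str.split? is none only for sep = "")
def pysplit (s sep : String) : List String := (PySem.Str.split? s sep).getD []
-- Python 's * n' on strings (exact for n as produced here)
def pyrep (s : String) (n : Int) : String :=
  String.ofList (List.flatten (List.replicate n.toNat s.toList))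

-- ===== PORT A =====
-- the per-file set 'nonunique_for_this_filename' (built in insertion order)
def aSetFor (parts1 parts2 : List String) : PySem.Set Int :=
  (PySem.List.pyRange 0 (parts1.length : Int) 1).foldl (fun s i =>
    if i < (parts2.length : Int) then
      let s := if PySem.List.pyGetD parts2 i "" == PySem.List.pyGetD parts1 i "" then
                 PySem.Set.add s i else s
      if PySem.List.pyGetD parts2 (-1 - i) "" == PySem.List.pyGetD parts1 (-1 - i) "" then
        PySem.Set.add s (-i - 1) else s
    else s) PySem.Set.empty

-- the final display-name loop with break
def aDisp (parts1 : List String) (u : List Int) (m : Int) : List Int → String → String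
  | [], disp => disp
  | i :: rest, disp =>
    let disp := scat "/" disp
    if PySem.List.pyGetD u i 0 == m then scat (PySem.List.pyGetD parts1 i "") disp
    else aDisp parts1 u m rest disp

-- A iterates its Python set only to apply commutative decrements, so folding the
-- PySem.Set in insertion order is exact.
def get_shortest_unique_filename (filename : String) (filenames : List String) : String :=
  let filename1 := PySem.Str.replace filename "\\" "/"
  let fns1 := filenames.map (fun fn => PySem.Str.replace fn "\\" "/")
  let fns := fns1.filter (fun fn => fn != filename1)
  let nameparts1 := pysplit filename1 "/"
  let uniqueness : List Int := nameparts1.map (fun _ => (fns.length : Int))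
  let uniqueness := fns.foldl (fun u filename2 =>
    (aSetFor nameparts1 (pysplit filename2 "/")).foldl
      (fun u i => PySem.List.pySetD u i (PySem.List.pyGetD u i 0 - 1)) u) uniqueness
  match PySem.List.max? (PySem.List.slice uniqueness none (some (-1))) (fun x => x) with
  | none => ""  -- Python: max([]) raises ValueError; excluded by Pre_
  | some max_uniqueness =>
    if max_uniqueness == 0 then PySem.List.pyGetD nameparts1 (-1) ""
    else aDisp nameparts1 uniqueness max_uniqueness
           ((PySem.List.pyRange 0 ((uniqueness.length : Int) - 1) 1).reverse)
           (PySem.List.pyGetD nameparts1 (-1) "")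

-- ===== PORT B =====
def get_shortest_unique_filename_alt (filename : String) (filenames : List String) : String :=
  let fn1 := PySem.Str.replace filename "\\" "/"
  let parts1 := pysplit fn1 "/"
  let L := parts1.length
  let others := (filenames.filter (fun fn => PySem.Str.replace fn "\\" "/" != fn1)).map
      (fun fn => pysplit (PySem.Str.replace fn "\\" "/") "/")
  let n := others.length
  -- dict build: d[k] = d.get(k, 0) + 1 is Dict.modify k 0 (· + 1)
  let fb := others.foldl
    (fun (fb : PySem.Dict (Int × String) Int × PySem.Dict (Int × String) Int) p2 =>
      (PySem.List.enumerate p2 0).foldl (fun fb jp =>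
        (fb.1.modify (jp.1, jp.2) 0 (· + 1),
         fb.2.modify ((p2.length : Int) - 1 - jp.1, jp.2) 0 (· + 1))) fb)
    (PySem.Dict.empty, PySem.Dict.empty)
  let uniqueness : List Int := (PySem.List.pyRange 0 (L : Int) 1).map (fun j =>
      (n : Int) - fb.1.getD (j, PySem.List.pyGetD parts1 j "") 0
                - fb.2.getD ((L : Int) - 1 - j, PySem.List.pyGetD parts1 j "") 0)
  match PySem.List.max? (PySem.List.slice uniqueness none (some (-1))) (fun x => x) with
  | none => ""  -- Python: max([]) raises ValueError; excluded by Pre_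
  | some m =>
    if m == 0 then PySem.List.pyGetD parts1 (-1) ""
    else
      match PySem.List.max? ((PySem.List.pyRange 0 ((L : Int) - 1) 1).filter
          (fun j => PySem.List.pyGetD uniqueness j 0 == m)) (fun x => x) with
      | none => ""  -- unreachable: m is attained in uniqueness[:-1]
      | some i => scat (PySem.List.pyGetD parts1 i "")
                    (scat (pyrep "/" ((L : Int) - 1 - i)) (PySem.List.pyGetD parts1 (-1) ""))

-- ===== PRECONDITION & SPEC =====
-- Pre_ excludes exactly the filenames whose normalized form has no '/' at all: there
-- uniqueness[:-1] is empty and Python's max([]) raises ValueError (B raises identically).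
def Pre_get_shortest_unique_filename (filename : String) (filenames : List String) : Prop :=
  '/' ∈ filename.toList ∨ '\\' ∈ filename.toList
instance (filename : String) (filenames : List String) : Decidable (Pre_get_shortest_unique_filename filename filenames) := by
  unfold Pre_get_shortest_unique_filename; infer_instance
def pvWitness_get_shortest_unique_filename : String × List String := ("a/b", ["a/c"])

def Spec_get_shortest_unique_filename (filename : String) (filenames : List String) (out : String) : Prop := out = get_shortest_unique_filename_alt filename filenames
instance (filename : String) (filenames : List String) (out : String) : Decidable (Spec_get_shortest_unique_filename filename filenames out) := by
  unfold Spec_get_shortest_unique_filename; infer_instance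

-- ===== CLAIM (what is proved, stated in full; the proofs are below) =====
def Claim_equal_get_shortest_unique_filename : Prop := ∀ (filename : String) (filenames : List String), Dom_get_shortest_unique_filename filename filenames → Pre_get_shortest_unique_filename filename filenames → Spec_get_shortest_unique_filename filename filenames (get_shortest_unique_filename filename filenames)

-- ===== LEMMAS AND PROOFS =====

-- canonical per-file match predicates (Nat index j < P.length)
def FrontB (P q : List String) (j : Nat) : Bool :=
  decide (j < q.length) && (q.getD j "" == P.getD j "")
def BackB (P q : List String) (j : Nat) : Bool :=
  decide (P.length - 1 - j < q.length) &&
    (q.getD (q.length - 1 - (P.length - 1 - j)) "" == P.getD j "")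
-- the common uniqueness list both ports compute
def uniqSpec (P : List String) (Q : List (List String)) : List Int :=
  (List.range P.length).map (fun j =>
    (Q.length : Int) - (Q.countP (fun q => FrontB P q j) : Int) - (Q.countP (fun q => BackB P q j) : Int))

-- Python slot of a (possibly negative) in-range index
def slot (L : Nat) (e : Int) : Nat := if 0 ≤ e then e.toNat else L - (-e).toNat

theorem pyIdx?_in (L : Nat) (e : Int) (h1 : -(L : Int) ≤ e) (h2 : e < L) :
    PySem.List.pyIdx? L e = some (slot L e) := by
  simp only [PySem.List.pyIdx?, slot]
  split_ifs with h3 h4 h5 <;> first | rfl | omega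

theorem slot_lt (L : Nat) (e : Int) (h1 : -(L : Int) ≤ e) (h2 : e < L) (hL : 0 < L) :
    slot L e < L := by
  simp only [slot]; split_ifs with h <;> omega

theorem pyGetD_in {α : Type} (u : List α) (e : Int) (d : α)
    (h1 : -(u.length : Int) ≤ e) (h2 : e < u.length) :
    PySem.List.pyGetD u e d = u.getD (slot u.length e) d := by
  simp only [PySem.List.pyGetD, PySem.List.pyGet?, pyIdx?_in u.length e h1 h2,
    Option.bind_some, List.getD_eq_getElem?_getD]

theorem pySetD_in {α : Type} (u : List α) (e : Int) (v : α)
    (h1 : -(u.length : Int) ≤ e) (h2 : e < u.length) :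
    PySem.List.pySetD u e v = u.set (slot u.length e) v := by
  simp [PySem.List.pySetD, PySem.List.pySet?, pyIdx?_in u.length e h1 h2]

theorem self_eq_range_map (u : List Int) :
    u = (List.range u.length).map (fun j => u.getD j 0) := by
  apply List.ext_getElem
  · simp
  · intro i h1 h2
    simp only [List.getElem_map, List.getElem_range, List.getD_eq_getElem?_getD,
      List.getElem?_eq_getElem (by simpa using h2)]
    rfl

-- the decrement loop over a list of in-range (possibly negative) indices
theorem decr_foldl (es : List Int) : ∀ (u : List Int),
    (∀ e ∈ es, -(u.length : Int) ≤ e ∧ e < u.length) →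
    es.foldl (fun u i => PySem.List.pySetD u i (PySem.List.pyGetD u i 0 - 1)) u
      = (List.range u.length).map
          (fun j => u.getD j 0 - (es.countP (fun e => decide (slot u.length e = j)) : Int)) := by
  induction es with
  | nil =>
    intro u _
    simpa using self_eq_range_map u
  | cons e es ih =>
    intro u hb
    have he := hb e (by simp)
    have hL : 0 < u.length := by omega
    have hslot := slot_lt u.length e he.1 he.2 hL
    simp only [List.foldl_cons]
    rw [pySetD_in u e _ he.1 he.2]
    rw [ih (u.set (slot u.length e) (PySem.List.pyGetD u e 0 - 1))
        (by simpa using fun x hx => hb x (by simp [hx]))]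
    simp only [List.length_set]
    apply List.map_congr_left
    intro j hj
    have hjL : j < u.length := List.mem_range.mp hj
    have hget : (u.set (slot u.length e) (PySem.List.pyGetD u e 0 - 1)).getD j 0
        = if slot u.length e = j then u.getD j 0 - 1 else u.getD j 0 := by
      simp only [List.getD_eq_getElem?_getD, List.getElem?_set]
      split_ifs with h
      · subst h
        simp [List.getElem?_eq_getElem hjL, hslot, pyGetD_in u e 0 he.1 he.2,
          List.getD_eq_getElem?_getD]
      · rfl
    rw [hget, List.countP_cons]
    split_ifs with h <;> · simp only [decide_eq_true_eq] at *; push_cast; omega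

-- per-index contribution of one other filename to A's set
def ablock (P q : List String) (i : Nat) : List Int :=
  if (i : Int) < (q.length : Int) then
    (if PySem.List.pyGetD q i "" == PySem.List.pyGetD P i "" then [(i : Int)] else []) ++
    (if PySem.List.pyGetD q (-1 - (i : Int)) "" == PySem.List.pyGetD P (-1 - (i : Int)) "" then
      [-(i : Int) - 1] else [])
  else []

theorem mem_ablock_bound (P q : List String) (N : Nat) (e : Int)
    (he : e ∈ (List.range N).flatMap (ablock P q)) : -(N : Int) ≤ e ∧ e < N := by
  rcases List.mem_flatMap.mp he with ⟨i, hi, hei⟩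
  have hiN : i < N := List.mem_range.mp hi
  have : e = (i : Int) ∨ e = -(i : Int) - 1 := by
    simp only [ablock] at hei
    split_ifs at hei <;> simp at hei <;> tauto
  rcases this with h | h <;> omega

theorem aSetFor_eq (P q : List String) :
    aSetFor P q = (List.range P.length).flatMap (ablock P q) := by
  unfold aSetFor
  rw [PySem.List.pyRange_zero_natCast, List.foldl_map]
  generalize P.length = N
  induction N with
  | zero => rfl
  | succ N ih =>
    have hb := mem_ablock_bound P q N
    rw [List.range_succ, List.foldl_append, List.flatMap_append, ih]
    simp only [List.foldl_cons, List.foldl_nil, List.flatMap_cons, List.flatMap_nil,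
      List.append_nil, ablock]
    have hnotmem : ((N : Nat) : Int) ∉ (List.range N).flatMap (ablock P q) := by
      intro hm; have := hb _ hm; omega
    have hnotmem2 : -((N : Nat) : Int) - 1 ∉ (List.range N).flatMap (ablock P q) := by
      intro hm; have := hb _ hm; omega
    split_ifs <;>
      first
        | rfl
        | (rw [PySem.Set.add_of_not_mem hnotmem, PySem.Set.add_of_not_mem (by
              intro hm
              rcases List.mem_append.mp hm with hm | hm
              · exact absurd (hb _ hm) (by omega)
              · simp at hm; omega)]
           simp)
        | (rw [PySem.Set.add_of_not_mem hnotmem]; simp)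
        | (rw [PySem.Set.add_of_not_mem hnotmem2]; simp)
        | simp

theorem sum_map_ite (L t : Nat) (a : Nat → Nat) (ht : t < L) :
    ((List.range L).map (fun i => if i = t then a i else 0)).sum = a t := by
  induction L with
  | zero => omega
  | succ L ih =>
    rw [List.range_succ, List.map_append, List.sum_append]
    by_cases h : t = L
    · subst h
      have : ((List.range t).map (fun i => if i = t then a i else 0)).sum = 0 := by
        apply List.sum_eq_zero
        intro x hx
        rcases List.mem_map.mp hx with ⟨i, hi, rfl⟩
        have := List.mem_range.mp hi
        simp [Nat.ne_of_lt this]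
      simp [this]
    · have ht' : t < L := by omega
      rw [ih ht']
      simp
      omega

theorem count_ablock (P q : List String) (j : Nat) (hj : j < P.length) :
    ((List.range P.length).flatMap (ablock P q)).countP
        (fun e => decide (slot P.length e = j))
      = (if FrontB P q j then 1 else 0) + (if BackB P q j then 1 else 0) := by
  rw [List.countP_flatMap]
  have hpt : ∀ i ∈ List.range P.length,
      (List.countP (fun e => decide (slot P.length e = j)) ∘ ablock P q) i
        = (if i = j then (if FrontB P q j then 1 else 0) else 0)
          + (if i = P.length - 1 - j then (if BackB P q j then 1 else 0) else 0) := by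
    intro i hi
    have hiL : i < P.length := List.mem_range.mp hi
    have hslot_pos : slot P.length (i : Int) = i := by simp [slot]
    have hslot_neg : slot P.length (-(i : Int) - 1) = P.length - 1 - i := by
      simp only [slot]; split_ifs with h <;> omega
    simp only [Function.comp_apply, ablock]
    by_cases hg : (i : Int) < (q.length : Int)
    · have hgN : i < q.length := by exact_mod_cast hg
      have hF : i = j → (FrontB P q j
          = (PySem.List.pyGetD q (i : Int) "" == PySem.List.pyGetD P (i : Int) "")) := by
        intro h; subst h
        simp only [FrontB, PySem.List.pyGetD_natCast, decide_eq_true_eq,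
          Bool.and_eq_true]
        simp [hgN]
      have hB : i = P.length - 1 - j → (BackB P q j
          = (PySem.List.pyGetD q (-1 - (i : Int)) "" == PySem.List.pyGetD P (-1 - (i : Int)) "")) := by
        intro h
        have hq2 : P.length - 1 - j < q.length := by omega
        have e1 : PySem.List.pyGetD q (-1 - (i : Int)) ""
            = q.getD (q.length - 1 - (P.length - 1 - j)) "" := by
          rw [pyGetD_in q (-1 - (i : Int)) "" (by omega) (by omega)]
          congr 1
          simp only [slot]
          split_ifs with hh <;> omega
        have e2 : PySem.List.pyGetD P (-1 - (i : Int)) "" = P.getD j "" := by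
          rw [pyGetD_in P (-1 - (i : Int)) "" (by omega) (by omega)]
          congr 1
          simp only [slot]
          split_ifs with hh <;> omega
        rw [e1, e2]
        simp only [BackB]
        simp [hq2]
      simp only [if_pos hg]
      cases hfv : (PySem.List.pyGetD q (i : Int) "" == PySem.List.pyGetD P (i : Int) "") <;>
        cases hbv : (PySem.List.pyGetD q (-1 - (i : Int)) "" == PySem.List.pyGetD P (-1 - (i : Int)) "") <;>
        simp only [hfv, hbv] at hF hB <;>
        simp only [List.countP_append, List.countP_cons, List.countP_nil,
          decide_eq_true_eq, hslot_pos, hslot_neg, Bool.false_eq_true, if_true, if_false] <;>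
        · by_cases hij : i = j
          · rw [if_pos hij, hF hij]
            by_cases hib : i = P.length - 1 - j
            · rw [if_pos hib, hB hib]
              try simp only [Bool.false_eq_true, if_false, if_true]
              try split_ifs <;> omega
              try omega
            · rw [if_neg hib]
              try simp only [Bool.false_eq_true, if_false, if_true]
              try split_ifs <;> omega
              try omega
          · rw [if_neg hij]
            by_cases hib : i = P.length - 1 - j
            · rw [if_pos hib, hB hib]
              try simp only [Bool.false_eq_true, if_false, if_true]
              try split_ifs <;> omega
              try omega
            · rw [if_neg hib]
              try simp only [Bool.false_eq_true, if_false, if_true]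
              try split_ifs <;> omega
              try omega
    · have hgN : ¬ i < q.length := by omega
      simp only [if_neg hg, List.countP_nil]
      split_ifs with c1 c2 c3 c4 <;> try rfl
      all_goals
        first
          | (exfalso; simp only [FrontB, Bool.and_eq_true, decide_eq_true_eq] at *; omega)
          | (exfalso; simp only [BackB, Bool.and_eq_true, decide_eq_true_eq] at *; omega)
  rw [List.map_congr_left hpt, List.sum_map_add, sum_map_ite _ _ _ hj,
    sum_map_ite _ _ _ (by omega)]

theorem perfile (P q : List String) (g : Nat → Int) :
    (aSetFor P q).foldl
        (fun u i => PySem.List.pySetD u i (PySem.List.pyGetD u i 0 - 1))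
        ((List.range P.length).map g)
      = (List.range P.length).map
          (fun j => g j - (if FrontB P q j then 1 else 0) - (if BackB P q j then 1 else 0)) := by
  have hb : ∀ e ∈ (List.range P.length).flatMap (ablock P q),
      -(((List.range P.length).map g).length : Int) ≤ e ∧ e < ((List.range P.length).map g).length := by
    simp only [List.length_map, List.length_range]
    exact fun e he => mem_ablock_bound P q P.length e he
  rw [aSetFor_eq, decr_foldl _ _ hb]
  simp only [List.length_map, List.length_range]
  apply List.map_congr_left
  intro j hj
  have hjL : j < P.length := List.mem_range.mp hj
  have hgd : ((List.range P.length).map g).getD j 0 = g j := by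
    simp [List.getD_eq_getElem?_getD, List.getElem?_range hjL]
  rw [hgd, count_ablock P q j hjL]
  split_ifs <;> push_cast <;> ring

-- A's whole uniqueness loop
theorem A_loop (P : List String) (Q : List (List String)) : ∀ (g : Nat → Int),
    Q.foldl (fun u q =>
        (aSetFor P q).foldl
          (fun u i => PySem.List.pySetD u i (PySem.List.pyGetD u i 0 - 1)) u)
        ((List.range P.length).map g)
      = (List.range P.length).map (fun j =>
          g j - (Q.countP (fun q => FrontB P q j) : Int) - (Q.countP (fun q => BackB P q j) : Int)) := by
  induction Q with
  | nil => intro g; simp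
  | cons q Q ih =>
    intro g
    simp only [List.foldl_cons, List.countP_cons]
    rw [perfile P q g, ih]
    apply List.map_congr_left
    intro j hj
    split_ifs <;> push_cast <;> ring

-- B: the pair-of-dicts fold is a pair of counters
theorem fb_eq (Q : List (List String)) :
    Q.foldl
      (fun (fb : PySem.Dict (Int × String) Int × PySem.Dict (Int × String) Int) p2 =>
        (PySem.List.enumerate p2 0).foldl (fun fb jp =>
          (fb.1.modify (jp.1, jp.2) 0 (· + 1),
           fb.2.modify ((p2.length : Int) - 1 - jp.1, jp.2) 0 (· + 1))) fb)
      (PySem.Dict.empty, PySem.Dict.empty)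
    = (PySem.Dict.counter (Q.flatMap (fun q => PySem.List.enumerate q 0)),
       PySem.Dict.counter (Q.flatMap (fun q =>
         (PySem.List.enumerate q 0).map (fun jp => ((q.length : Int) - 1 - jp.1, jp.2))))) := by
  rw [PySem.Dict.counter_eq_foldl, PySem.Dict.counter_eq_foldl,
    List.foldl_flatMap, List.foldl_flatMap]
  suffices hgen : ∀ (Q : List (List String)) (a b : PySem.Dict (Int × String) Int),
      Q.foldl
        (fun (fb : PySem.Dict (Int × String) Int × PySem.Dict (Int × String) Int) p2 =>
          (PySem.List.enumerate p2 0).foldl (fun fb jp =>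
            (fb.1.modify (jp.1, jp.2) 0 (· + 1),
             fb.2.modify ((p2.length : Int) - 1 - jp.1, jp.2) 0 (· + 1))) fb) (a, b)
      = (Q.foldl (fun d q =>
            (PySem.List.enumerate q 0).foldl (fun d x => d.modify x 0 (· + 1)) d) a,
         Q.foldl (fun d q =>
            ((PySem.List.enumerate q 0).map (fun jp => ((q.length : Int) - 1 - jp.1, jp.2))).foldl
              (fun d x => d.modify x 0 (· + 1)) d) b) by
    exact hgen Q PySem.Dict.empty PySem.Dict.empty
  intro Q
  induction Q with
  | nil => intro a b; rfl
  | cons q Q ih =>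
    intro a b
    simp only [List.foldl_cons]
    rw [List.foldl_map]
    rw [PySem.List.foldl_prod_mk
      (f := fun d (jp : Int × String) => PySem.Dict.modify d (jp.1, jp.2) 0 (· + 1))
      (g := fun d (jp : Int × String) => PySem.Dict.modify d ((q.length : Int) - 1 - jp.1, jp.2) 0 (· + 1))]
    rw [ih]

theorem sum_map_indicator {α : Type} (l : List α) (p : α → Bool) :
    (l.map (fun x => if p x then (1 : Nat) else 0)).sum = l.countP p := by
  induction l with
  | nil => rfl
  | cons a l ih =>
    simp only [List.map_cons, List.sum_cons, List.countP_cons, ih]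
    split_ifs with h <;> omega

theorem front_lookup (P : List String) (Q : List (List String)) (j : Nat) (hj : j < P.length) :
    (PySem.Dict.counter (Q.flatMap (fun q => PySem.List.enumerate q 0))).getD
        ((j : Int), P.getD j "") 0
      = (Q.countP (fun q => FrontB P q j) : Int) := by
  rw [PySem.Dict.getD_counter]
  have hpt : ∀ q ∈ Q, (List.count ((j : Int), P.getD j "") ∘ (fun q => PySem.List.enumerate q 0)) q
      = if FrontB P q j then 1 else 0 := by
    intro q _
    have hp := PySem.List.pairwise_lt_enumerate q 0
    have nd : (PySem.List.enumerate q 0).Nodup :=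
      hp.imp fun h heq => by subst heq; exact lt_irrefl _ h
    simp only [Function.comp_apply]
    rw [nd.count]
    by_cases hc : FrontB P q j = true
    · rw [if_pos hc]
      have hc' := hc
      simp only [FrontB, Bool.and_eq_true, decide_eq_true_eq, beq_iff_eq] at hc'
      rw [if_pos ?_]
      rw [PySem.List.mem_enumerate_iff]
      refine ⟨j, hc'.1, ?_⟩
      have hgd : q.getD j "" = q[j] := List.getD_eq_getElem q "" hc'.1
      simp only [Prod.mk.injEq]
      exact ⟨by omega, hc'.2.symm.trans hgd⟩
    · rw [if_neg hc]
      rw [if_neg ?_]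
      rw [PySem.List.mem_enumerate_iff]
      rintro ⟨k, hk, he⟩
      simp only [Prod.mk.injEq] at he
      have hjk : j = k := by omega
      subst hjk
      apply hc
      simp only [FrontB, Bool.and_eq_true, decide_eq_true_eq, beq_iff_eq]
      exact ⟨hk, by rw [List.getD_eq_getElem q "" hk, he.2]⟩
  rw [List.count_flatMap, List.map_congr_left hpt, sum_map_indicator]

theorem back_lookup (P : List String) (Q : List (List String)) (j : Nat) (hj : j < P.length) :
    (PySem.Dict.counter (Q.flatMap (fun q =>
        (PySem.List.enumerate q 0).map (fun jp => ((q.length : Int) - 1 - jp.1, jp.2))))).getD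
        ((P.length : Int) - 1 - (j : Int), P.getD j "") 0
      = (Q.countP (fun q => BackB P q j) : Int) := by
  rw [PySem.Dict.getD_counter]
  have hpt : ∀ q ∈ Q, (List.count ((P.length : Int) - 1 - (j : Int), P.getD j "") ∘
        (fun q => (PySem.List.enumerate q 0).map (fun jp => ((q.length : Int) - 1 - jp.1, jp.2)))) q
      = if BackB P q j then 1 else 0 := by
    intro q _
    have hp := PySem.List.pairwise_lt_enumerate q 0
    have nd : ((PySem.List.enumerate q 0).map (fun jp => ((q.length : Int) - 1 - jp.1, jp.2))).Nodup := by
      unfold List.Nodup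
      rw [List.pairwise_map]
      refine hp.imp ?_
      intro a b h hne
      simp only [Prod.mk.injEq] at hne
      omega
    simp only [Function.comp_apply]
    rw [nd.count]
    by_cases hc : BackB P q j = true
    · rw [if_pos hc]
      have hc' := hc
      simp only [BackB, Bool.and_eq_true, decide_eq_true_eq, beq_iff_eq] at hc'
      rw [if_pos ?_]
      rw [List.mem_map]
      refine ⟨((q.length - 1 - (P.length - 1 - j) : Nat), q[(q.length - 1 - (P.length - 1 - j) : Nat)]'(by omega)), ?_, ?_⟩
      · rw [PySem.List.mem_enumerate_iff]
        exact ⟨q.length - 1 - (P.length - 1 - j), by omega, by simp⟩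
      · simp only [Prod.mk.injEq]
        constructor
        · push_cast
          omega
        · rw [← hc'.2, List.getD_eq_getElem q "" (by omega)]
    · rw [if_neg hc]
      rw [if_neg ?_]
      rw [List.mem_map]
      rintro ⟨jp, hjp, he⟩
      rw [PySem.List.mem_enumerate_iff] at hjp
      rcases hjp with ⟨k, hk, rfl⟩
      simp only [Prod.mk.injEq] at he
      apply hc
      simp only [BackB, Bool.and_eq_true, decide_eq_true_eq, beq_iff_eq]
      have h1 : (q.length : Int) - 1 - ((0 : Int) + k) = (P.length : Int) - 1 - j := he.1
      have hlt : P.length - 1 - j < q.length := by omega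
      have hkk : k = q.length - 1 - (P.length - 1 - j) := by omega
      refine ⟨hlt, ?_⟩
      rw [List.getD_eq_getElem q "" (by omega)]
      rw [← he.2]
      congr 1
      omega
  rw [List.count_flatMap, List.map_congr_left hpt, sum_map_indicator]

theorem toList_scat (a b : String) : (scat a b).toList = a.toList ++ b.toList := by
  simp [scat]

theorem toList_pyrep_slash (n : Int) : (pyrep "/" n).toList = List.replicate n.toNat '/' := by
  simp only [pyrep, String.toList_ofList]
  generalize n.toNat = k
  induction k with
  | zero => rfl
  | succ k ih => simp only [List.replicate_succ, List.flatten_cons, ih]; rfl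

theorem string_ext {a b : String} (h : a.toList = b.toList) : a = b := by
  have h2 := congrArg String.ofList h
  simpa [String.ofList_toList] using h2

-- A's display loop with break, for the greatest matching index t < k
theorem aDisp_spec (P : List String) (u : List Int) (m : Int) :
    ∀ (k : Nat) (d : String) (t : Nat), t < k → u.getD t 0 = m →
    (∀ j, t < j → j < k → u.getD j 0 ≠ m) →
    aDisp P u m ((PySem.List.pyRange 0 (k : Int) 1).reverse) d
      = scat (P.getD t "") (scat (pyrep "/" ((k : Int) - (t : Int))) d) := by
  intro k
  induction k with
  | zero => intro d t ht; omega
  | succ k ih =>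
    intro d t ht hval hmax
    have hsplit : PySem.List.pyRange 0 ((k + 1 : Nat) : Int) 1
        = PySem.List.pyRange 0 (k : Int) 1 ++ [(k : Int)] := by
      rw [PySem.List.pyRange_zero_natCast, PySem.List.pyRange_zero_natCast,
        List.range_succ, List.map_append]
      simp
    rw [hsplit, List.reverse_append, List.reverse_singleton, List.singleton_append]
    simp only [aDisp]
    rw [PySem.List.pyGetD_natCast u k 0]
    by_cases htk : t = k
    · subst htk
      rw [hval]
      simp only [beq_self_eq_true, if_true]
      rw [PySem.List.pyGetD_natCast P t ""]
      have h1 : pyrep "/" (((t + 1 : Nat) : Int) - (t : Int)) = "/" := by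
        apply string_ext
        rw [toList_pyrep_slash]
        have : ((((t + 1 : Nat) : Int)) - (t : Int)).toNat = 1 := by omega
        rw [this]
        decide
      rw [h1]
    · have hne : u.getD k 0 ≠ m := hmax k (by omega) (by omega)
      rw [if_neg (by simpa [beq_iff_eq] using hne)]
      rw [ih (scat "/" d) t (by omega) hval (fun j h1 h2 => hmax j h1 (by omega))]
      apply congrArg (scat (P.getD t ""))
      apply string_ext
      have hsl : ("/" : String).toList = ['/'] := by decide
      simp only [toList_scat, toList_pyrep_slash, hsl]
      rw [← List.append_assoc, ← List.replicate_succ']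
      have h2 : (((k + 1 : Nat) : Int) - (t : Int)).toNat = ((k : Int) - (t : Int)).toNat + 1 := by
        omega
      rw [h2]

-- ===== VERDICT (by name: the statement is the Claim_ definition above) =====
theorem get_shortest_unique_filename_spec : Claim_equal_get_shortest_unique_filename := by
  intro filename filenames _hdom _hpre
  show get_shortest_unique_filename filename filenames
      = get_shortest_unique_filename_alt filename filenames
  unfold get_shortest_unique_filename get_shortest_unique_filename_alt
  simp only []
  -- name the normalized pieces
  generalize hF1 : PySem.Str.replace filename "\\" "/" = F1
  generalize hP : pysplit F1 "/" = P
  -- B's others = (A's fns).map (pysplit · "/")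
  rw [List.filter_map]
  simp only [Function.comp_def]
  generalize List.filter (fun fn => PySem.Str.replace fn "\\" "/" != F1) filenames = flt
  rw [show (fun fn => pysplit (PySem.Str.replace fn "\\" "/") "/")
        = ((fun s => pysplit s "/") ∘ (fun fn => PySem.Str.replace fn "\\" "/")) from rfl,
      ← List.map_map]
  generalize flt.map (fun fn => PySem.Str.replace fn "\\" "/") = fns
  rw [← List.foldl_map (f := fun s => pysplit s "/")
        (g := fun u q => (aSetFor P q).foldl
          (fun u i => PySem.List.pySetD u i (PySem.List.pyGetD u i 0 - 1)) u)]
  generalize hQ : fns.map (fun s => pysplit s "/") = Q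
  have hlen : Q.length = fns.length := by rw [← hQ]; simp
  rw [← hlen]
  have hinit : (List.map (fun (_ : String) => (Q.length : Int)) P)
      = (List.range P.length).map (fun _ => (Q.length : Int)) := by
    simp [List.map_const']
  rw [hinit, A_loop P Q (fun _ => (Q.length : Int))]
  rw [fb_eq Q]
  rw [PySem.List.pyRange_zero_natCast P.length, List.map_map]
  have hBu : (List.range P.length).map
        ((fun j => (Q.length : Int)
            - (PySem.Dict.counter (Q.flatMap (fun q => PySem.List.enumerate q 0))).getD
                (j, PySem.List.pyGetD P j "") 0
            - (PySem.Dict.counter (Q.flatMap (fun q =>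
                (PySem.List.enumerate q 0).map (fun jp => ((q.length : Int) - 1 - jp.1, jp.2))))).getD
                ((P.length : Int) - 1 - j, PySem.List.pyGetD P j "") 0)
          ∘ (fun k : Nat => (k : Int)))
      = (List.range P.length).map (fun j =>
          (fun _ : Nat => (Q.length : Int)) j
            - (Q.countP (fun q => FrontB P q j) : Int)
            - (Q.countP (fun q => BackB P q j) : Int)) := by
    apply List.map_congr_left
    intro j hj
    have hjL : j < P.length := List.mem_range.mp hj
    simp only [Function.comp_apply]
    rw [PySem.List.pyGetD_natCast P j "", front_lookup P Q j hjL, back_lookup P Q j hjL]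
  rw [hBu]
  beta_reduce
  generalize hU : (List.map (fun j => (Q.length : Int)
      - (List.countP (fun q => FrontB P q j) Q : Int)
      - (List.countP (fun q => BackB P q j) Q : Int)) (List.range P.length)) = U
  have hUlen : U.length = P.length := by rw [← hU]; simp
  rw [hUlen]
  cases hmax : PySem.List.max? (PySem.List.slice U none (some (-1))) (fun x => x) with
  | none => rfl
  | some m =>
    by_cases hm0 : (m == 0) = true
    · simp only [hm0, if_true]
    · have hm0' : (m == 0) = false := by
        cases h : (m == 0)
        · rfl
        · exact absurd h hm0
      simp only [hm0', Bool.false_eq_true, if_false]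
      rw [PySem.List.slice_to_neg_one] at hmax
      have hmem := PySem.List.max?_mem hmax
      obtain ⟨t, ht, hvt⟩ := List.getElem_of_mem hmem
      have htlen : t < U.length - 1 := by simpa using ht
      have hvtU : U.getD t 0 = m := by
        rw [List.getD_eq_getElem U 0 (by omega), ← hvt, List.getElem_dropLast]
      have htmem : (↑t : Int) ∈ (PySem.List.pyRange 0 ((P.length : Int) - 1) 1).filter
          (fun j => PySem.List.pyGetD U j 0 == m) := by
        rw [List.mem_filter]
        refine ⟨PySem.List.mem_pyRange_one.mpr ⟨by omega, by omega⟩, ?_⟩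
        rw [PySem.List.pyGetD_natCast]
        exact beq_iff_eq.mpr hvtU
      cases hmax2 : PySem.List.max? ((PySem.List.pyRange 0 ((P.length : Int) - 1) 1).filter
          (fun j => PySem.List.pyGetD U j 0 == m)) (fun x => x) with
      | none =>
        exact absurd ((PySem.List.max?_eq_none_iff _ _).mp hmax2) (List.ne_nil_of_mem htmem)
      | some i =>
        have himem := PySem.List.max?_mem hmax2
        have hiisMax := PySem.List.max?_isMax hmax2
        rw [List.mem_filter] at himem
        have hir := PySem.List.mem_pyRange_one.mp himem.1
        have hipos : (0 : Int) ≤ i := hir.1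
        have hi2 : U.getD i.toNat 0 = m := by
          have h2 := himem.2
          rw [PySem.List.pyGetD_of_nonneg U 0 hipos] at h2
          exact beq_iff_eq.mp h2
        have hmaxti : ∀ j, i.toNat < j → j < P.length - 1 → U.getD j 0 ≠ m := by
          intro j h1 h2 heq
          have hjmem : (↑j : Int) ∈ (PySem.List.pyRange 0 ((P.length : Int) - 1) 1).filter
              (fun j => PySem.List.pyGetD U j 0 == m) := by
            rw [List.mem_filter]
            refine ⟨PySem.List.mem_pyRange_one.mpr ⟨by omega, by omega⟩, ?_⟩
            rw [PySem.List.pyGetD_natCast]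
            exact beq_iff_eq.mpr heq
          have hle := hiisMax _ hjmem
          simp only [] at hle
          omega
        have hbound : ((P.length : Int) - 1) = (((P.length - 1 : Nat)) : Int) := by omega
        rw [hbound]
        rw [aDisp_spec P U m (P.length - 1) _ i.toNat (by omega) hi2 hmaxti]
        simp only [PySem.List.pyGetD_of_nonneg P "" hipos]
        rw [show (((P.length - 1 : Nat)) : Int) - i
            = (((P.length - 1 : Nat)) : Int) - (i.toNat : Int) from by omega]
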